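-- pv_equiv track=rewrite | github.com/David-5-5/tutorial | python/algo/leecode2/algo2902.py | countSubMultisets2
-- ===== SOURCE A (Python) =====
-- from typing import List
-- from collections import Counter
--
-- def countSubMultisets2(nums: List[int], l: int, r: int) -> int:
--     # 滚动数组优化
--     # dp[i+1][j] = dp[i][j] + dp[i][j-x] + ... + dp[i][j-k*x]
--     # dp[i+1][j-x] = dp[i][j-x] + dp[i][j-2*x] ... + dp[i][j-k*x] + dp[i][j-(k+1)*x]
--     # 综合上面两式得出
--     # dp[i+1][j] = dp[i+1][j-x] + dp[i][j-x] - dp[i][j-(k+1)*x]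
--     # 无需对 k 进行遍历，修改上面方案如下
--     MOD = 10 ** 9 + 7
--     cnt = Counter(nums)
--
--     n = len(cnt) - (0 in cnt)
--     dp = [[0]* (r+1) for _ in range(n+1)]
--     dp[0][0] = cnt[0] + 1
--
--     del cnt[0] # 删除 0，是由于当 val = 0 时，转移方程无效
--
--     for i, val in enumerate(cnt):
--         for j in range(0, r+1):
--             dp[i+1][j] = (dp[i+1][j-val] if j-val>=0 else 0) + \
--                           dp[i][j] - \
--                           (dp[i][j-(cnt[val]+1)*val] if j-(cnt[val]+1)*val>=0 else 0)
--
--     return sum(dp[-1][l:]) % MOD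
-- ===== SOURCE B (Python) =====
-- from typing import List
-- from collections import Counter
--
-- def countSubMultisets2(nums: List[int], l: int, r: int) -> int:
--     # Grouped bounded-knapsack: explicit loop over 0..c copies of each value,
--     # zeros factored out as a multiplier applied at the end.
--     MOD = 10 ** 9 + 7
--     cnt = Counter(nums)
--     z = cnt.pop(0, 0)
--     dp = [0] * (r + 1)
--     dp[0] = 1
--     for val, c in cnt.items():
--         ndp = [0] * (r + 1)
--         for j in range(r + 1):
--             ndp[j] = sum(dp[j - k * val] for k in range(c + 1) if j - k * val >= 0)
--         dp = ndp
--     return sum(dp[l:r + 1]) * (z + 1) % MOD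
-- ===== Notes on version B (the rewrite author's own statement) =====
-- stated objective: alternative
-- what changed: Replaces A's prefix-difference (telescoped) row recurrence dp[i+1][j]=dp[i+1][j-v]+dp[i][j]-dp[i][j-(c+1)v] by a grouped bounded-knapsack pass that explicitly sums over k=0..c copies of each distinct value, and factors the zero count out as a final multiplier (z+1) instead of seeding dp[0][0] with it.
import Mathlib
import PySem

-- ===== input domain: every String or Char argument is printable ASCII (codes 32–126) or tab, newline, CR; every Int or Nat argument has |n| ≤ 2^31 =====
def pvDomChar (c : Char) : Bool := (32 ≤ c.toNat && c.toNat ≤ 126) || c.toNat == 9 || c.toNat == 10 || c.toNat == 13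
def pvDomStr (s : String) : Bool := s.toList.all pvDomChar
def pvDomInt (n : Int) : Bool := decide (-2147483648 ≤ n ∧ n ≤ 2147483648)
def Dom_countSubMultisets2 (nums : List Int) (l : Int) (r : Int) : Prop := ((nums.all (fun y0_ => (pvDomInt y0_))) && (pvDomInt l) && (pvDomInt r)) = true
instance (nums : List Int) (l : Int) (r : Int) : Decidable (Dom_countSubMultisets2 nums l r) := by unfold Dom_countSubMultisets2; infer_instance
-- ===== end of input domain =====

-- B replaces A's prefix-difference (telescoped) knapsack row update by an explicit
-- grouped sum over 0..c copies of each value, applying the zero count as a final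
-- multiplier instead of seeding the dp row with it.

-- ===== PORT A =====
-- inner loop 'for j in range(0, r+1)': dp[i+1][j-val] reads the already written
-- prefix of the new row; getD is exact there because inside Pre_ every accessed
-- index is in range (val ≥ 1, j-val guards nonnegative).
def pvRowA (prev : List Int) (val c : Int) (n : Nat) : List Int :=
  (List.range n).foldl
    (fun (acc : List Int) (j : Nat) =>
      acc ++ [ (if 0 ≤ (j : Int) - val then acc.getD ((j : Int) - val).toNat 0 else 0)
               + prev.getD j 0
               - (if 0 ≤ (j : Int) - (c + 1) * val then prev.getD ((j : Int) - (c + 1) * val).toNat 0 else 0) ]) []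

def countSubMultisets2 (nums : List Int) (l : Int) (r : Int) : Int :=
  let MOD : Int := 1000000007
  let cnt := PySem.Dict.counter nums
  -- dp[0] = [cnt[0]+1, 0, …, 0]  (row of length r+1; Python raises if r < 0 — outside Pre_)
  let row0 : List Int := (cnt.getD 0 0 + 1) :: List.replicate r.toNat 0
  let cnt' := cnt.erase 0
  -- 'for i, val in enumerate(cnt)' with lookups cnt[val]; only the last row is live
  let last := cnt'.keys.foldl (fun prev val => pvRowA prev val (cnt'.getD val 0) (r.toNat + 1)) row0
  PySem.Int.mod (PySem.List.slice last (some l) none).sum MOD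

-- ===== PORT B =====
def pvRowB (prev : List Int) (val c : Int) (n : Nat) : List Int :=
  (List.range n).map (fun (j : Nat) =>
    (PySem.List.pyRange 0 (c + 1)).foldl
      (fun s k => if 0 ≤ (j : Int) - k * val then s + prev.getD ((j : Int) - k * val).toNat 0 else s) 0)

def countSubMultisets2_alt (nums : List Int) (l : Int) (r : Int) : Int :=
  let MOD : Int := 1000000007
  let cnt := PySem.Dict.counter nums
  let z := cnt.getD 0 0          -- z = cnt.pop(0, 0)
  let cnt' := cnt.erase 0
  let dp0 : List Int := 1 :: List.replicate r.toNat 0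
  let last := cnt'.items.foldl (fun prev p => pvRowB prev p.1 p.2 (r.toNat + 1)) dp0
  PySem.Int.mod ((PySem.List.slice last (some l) (some (r + 1))).sum * (z + 1)) MOD

-- ===== PRECONDITION & SPEC =====
-- Pre_ excludes r < 0 (dp[0][0] is an IndexError on the empty row) and negative
-- elements (the transition reads dp[i+1][j-val] past the row end: IndexError).
def Pre_countSubMultisets2 (nums : List Int) (l : Int) (r : Int) : Prop :=
  0 ≤ r ∧ ∀ x ∈ nums, 0 ≤ x
instance (nums : List Int) (l : Int) (r : Int) : Decidable (Pre_countSubMultisets2 nums l r) := by unfold Pre_countSubMultisets2; infer_instance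
def pvWitness_countSubMultisets2 : List Int × Int × Int := ([1, 2, 2], 1, 3)

def Spec_countSubMultisets2 (nums : List Int) (l : Int) (r : Int) (out : Int) : Prop := out = countSubMultisets2_alt nums l r
instance (nums : List Int) (l : Int) (r : Int) (out : Int) : Decidable (Spec_countSubMultisets2 nums l r out) := by unfold Spec_countSubMultisets2; infer_instance

-- ===== CLAIM (what is proved, stated in full; the proofs are below) =====
def Claim_equal_countSubMultisets2 : Prop := ∀ (nums : List Int) (l : Int) (r : Int), Dom_countSubMultisets2 nums l r → Pre_countSubMultisets2 nums l r → Spec_countSubMultisets2 nums l r (countSubMultisets2 nums l r)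

-- ===== LEMMAS AND PROOFS =====

def pvG (prev : List Int) (j : Int) : Int := if 0 ≤ j then prev.getD j.toNat 0 else 0

def pvT (prev : List Int) (val : Int) (m : Nat) (j : Int) : Int :=
  ((List.range (m+1)).map (fun (k : Nat) => pvG prev (j - (k:Int)*val))).sum

theorem pvG_map (prev : List Int) (a j : Int) : pvG (prev.map (fun x => a*x)) j = a * pvG prev j := by
  unfold pvG
  split_ifs with h
  · simp [List.getD, List.getElem?_map]
    cases prev[j.toNat]? <;> simp
  · simp

theorem pvT_map (prev : List Int) (a val : Int) (m : Nat) (j : Int) :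
    pvT (prev.map (fun x => a*x)) val m j = a * pvT prev val m j := by
  unfold pvT
  rw [show (List.map (fun (k:Nat) => pvG (List.map (fun x => a * x) prev) (j - (k:Int) * val)) (List.range (m + 1)))
      = List.map (fun (k:Nat) => a * pvG prev (j - (k:Int) * val)) (List.range (m + 1)) from
      List.map_congr_left (fun k _ => pvG_map prev a _), List.sum_map_mul_left]

theorem pvT_telescope (prev : List Int) (val : Int) (m : Nat) (j : Int) :
    pvT prev val m j = pvG prev j + pvT prev val m (j - val) - pvG prev (j - ((m:Int)+1)*val) := by
  induction m generalizing j with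
  | zero => simp [pvT]
  | succ m ih =>
    have e1 : pvT prev val (m+1) j = pvT prev val m j + pvG prev (j - ((m:Int)+1)*val) := by
      unfold pvT
      rw [List.range_succ, List.map_append, List.sum_append]
      simp
    have e2 : pvT prev val (m+1) (j-val) = pvT prev val m (j-val) + pvG prev (j - ((m:Int)+2)*val) := by
      unfold pvT
      rw [List.range_succ, List.map_append, List.sum_append]
      ring_nf; simp; ring_nf
    rw [e1, e2, ih j]
    push_cast; ring_nf

theorem pvT_vanish (prev : List Int) (val : Int) (m : Nat) (j : Int)
    (hv : 0 < val) (hj : j < 0) : pvT prev val m j = 0 := by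
  unfold pvT
  apply List.sum_eq_zero
  intro x hx
  simp only [List.mem_map] at hx
  obtain ⟨k, -, rfl⟩ := hx
  have : j - (k:Int)*val < 0 := by
    have : 0 ≤ (k:Int)*val := mul_nonneg (by positivity) (le_of_lt hv)
    omega
  simp only [pvG, if_neg (not_le.mpr this)]

theorem pvRowB_eq (prev : List Int) (val : Int) (m : Nat) (n : Nat) :
    pvRowB prev val ((m:Nat) : Int) n = (List.range n).map (fun (j : Nat) => pvT prev val m (j:Int)) := by
  unfold pvRowB
  apply List.map_congr_left
  intro j _
  have hr : PySem.List.pyRange 0 ((m:Int) + 1) = (List.range (m+1)).map (fun (k:Nat) => (k:Int)) := by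
    have := PySem.List.pyRange_zero_natCast (m+1)
    push_cast at this ⊢
    exact this
  rw [hr, List.foldl_map]
  rw [PySem.List.foldl_congr_mem (List.range (m+1)) _
    (fun (s : Int) (k : Nat) => s + (if 0 ≤ (j:Int) - (k:Int)*val then prev.getD ((j:Int) - (k:Int)*val).toNat 0 else 0))
    0 (by intro acc x hx; by_cases h : 0 ≤ (j:Int) - (x:Int)*val <;> simp only [if_pos, h, if_false, add_zero]),
    PySem.List.foldl_add (List.range (m+1))
      (fun (k : Nat) => if 0 ≤ (j:Int) - (k:Int)*val then prev.getD ((j:Int) - (k:Int)*val).toNat 0 else 0) 0]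
  simp [pvT, pvG]

theorem pvRowA_eq (prev : List Int) (val : Int) (m : Nat) (n : Nat) (hv : 0 < val) :
    pvRowA prev val ((m:Nat) : Int) n = (List.range n).map (fun (j : Nat) => pvT prev val m (j:Int)) := by
  unfold pvRowA
  induction n with
  | zero => simp
  | succ n ih =>
    rw [List.range_succ, List.foldl_append, ih, List.map_append]
    simp only [List.foldl_cons, List.foldl_nil]
    congr 1
    congr 1
    -- the new entry equals pvT prev val m n
    have h2 : prev.getD n 0 = pvG prev (n:Int) := by simp [pvG]
    have h3 : (if 0 ≤ (n:Int) - ((m:Int) + 1) * val then prev.getD ((n:Int) - ((m:Int)+1)*val).toNat 0 else 0)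
        = pvG prev ((n:Int) - ((m:Int)+1)*val) := by simp [pvG]
    have h1 : (if 0 ≤ (n:Int) - val then (List.map (fun (j:Nat) => pvT prev val m (j:Int)) (List.range n)).getD ((n:Int) - val).toNat 0 else 0)
        = pvT prev val m ((n:Int) - val) := by
      split_ifs with h
      · have hlt : ((n:Int) - val).toNat < n := by omega
        rw [PySem.List.getD_map_range _ _ _ _ hlt]
        congr 1
        omega
      · exact (pvT_vanish prev val m _ hv (by omega)).symm
    rw [h1, h2, h3]
    show _ = pvT prev val m (n:Int)
    rw [pvT_telescope prev val m (n:Int)]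
    ring

theorem pvRowB_length (prev : List Int) (val c : Int) (n : Nat) : (pvRowB prev val c n).length = n := by
  simp [pvRowB]

theorem pvFold_length (n : Nat) (cf : Int → Int) (ks : List Int) (p : List Int) (hp : p.length = n) :
    (ks.foldl (fun prev k => pvRowB prev k (cf k) n) p).length = n := by
  induction ks generalizing p with
  | nil => simpa
  | cons k ks ih => exact ih _ (pvRowB_length _ _ _ _)

theorem pvFold_scale (n : Nat) (cf : Int → Nat) (a : Int) (ks : List Int)
    (hks : ∀ k ∈ ks, 0 < k) (p : List Int) :
    ks.foldl (fun prev k => pvRowA prev k ((cf k : Nat) : Int) n) (p.map (fun x => a * x)) =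
      (ks.foldl (fun prev k => pvRowB prev k ((cf k : Nat) : Int) n) p).map (fun x => a * x) := by
  induction ks generalizing p with
  | nil => rfl
  | cons k ks ih =>
    simp only [List.foldl_cons]
    have hstep : pvRowA (p.map (fun x => a * x)) k ((cf k : Nat) : Int) n
        = (pvRowB p k ((cf k : Nat) : Int) n).map (fun x => a * x) := by
      rw [pvRowA_eq _ _ _ _ (hks k (by simp)), pvRowB_eq]
      rw [List.map_map]
      apply List.map_congr_left
      intro j _
      simp [Function.comp, pvT_map]
    rw [hstep, ih (fun k hk => hks k (by simp [hk]))]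

theorem pvItems_erase (nums : List Int) :
    ((PySem.Dict.counter nums).erase 0).items
      = ((PySem.Set.ofList nums).filter (fun k => !(k == (0:Int)))).map
          (fun k => (k, (nums.count k : Int))) := by
  show (((PySem.Dict.counter nums).items).filter (fun p => !(p.1 == (0:Int))))
      = _
  rw [PySem.Dict.items_counter, List.filter_map]
  rfl

theorem pvKeys_erase (nums : List Int) :
    ((PySem.Dict.counter nums).erase 0).keys
      = (PySem.Set.ofList nums).filter (fun k => !(k == (0:Int))) := by
  show (((PySem.Dict.counter nums).erase 0).items).map Prod.fst = _
  rw [pvItems_erase, List.map_map]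
  exact List.map_id _

theorem pvGetD_erase (nums : List Int) (k : Int)
    (hk : k ∈ (PySem.Set.ofList nums).filter (fun k => !(k == (0:Int)))) :
    ((PySem.Dict.counter nums).erase 0).getD k 0 = (nums.count k : Int) := by
  apply PySem.Dict.getD_of_mem_items
  · rw [pvItems_erase]
    exact List.mem_map.mpr ⟨k, hk, rfl⟩
  · rw [pvKeys_erase]
    exact (PySem.Set.nodup_ofList nums).filter _

theorem pv_main (nums : List Int) (l r : Int)
    (hr : 0 ≤ r) (hnn : ∀ x ∈ nums, 0 ≤ x) :
    countSubMultisets2 nums l r = countSubMultisets2_alt nums l r := by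
  unfold countSubMultisets2 countSubMultisets2_alt
  simp only []
  set z := (PySem.Dict.counter nums).getD 0 0 with hz
  set n := r.toNat + 1 with hn
  set ks := (PySem.Set.ofList nums).filter (fun k => !(k == (0:Int))) with hks
  -- canonicalise the two folds
  have hA : ((PySem.Dict.counter nums).erase 0).keys.foldl
      (fun prev val => pvRowA prev val (((PySem.Dict.counter nums).erase 0).getD val 0) n)
      ((z + 1) :: List.replicate r.toNat 0)
      = ks.foldl (fun prev k => pvRowA prev k ((nums.count k : Nat) : Int) n)
          ((z + 1) :: List.replicate r.toNat 0) := by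
    rw [pvKeys_erase]
    exact PySem.List.foldl_congr_mem _ _ _ _
      (fun acc k hk => by rw [pvGetD_erase nums k hk])
  have hB : ((PySem.Dict.counter nums).erase 0).items.foldl
      (fun prev p => pvRowB prev p.1 p.2 n) ((1:Int) :: List.replicate r.toNat 0)
      = ks.foldl (fun prev k => pvRowB prev k ((nums.count k : Nat) : Int) n)
          ((1:Int) :: List.replicate r.toNat 0) := by
    rw [pvItems_erase, List.foldl_map]
  rw [hA, hB]
  have hpos : ∀ k ∈ ks, 0 < k := by
    intro k hk
    rw [hks, List.mem_filter] at hk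
    obtain ⟨h1, h2⟩ := hk
    have := hnn k ((PySem.Set.mem_ofList nums k).mp h1)
    simp at h2
    omega
  have hrow0 : ((z + 1) :: List.replicate r.toNat 0)
      = ((1:Int) :: List.replicate r.toNat 0).map (fun x => (z+1) * x) := by
    simp
  rw [hrow0, pvFold_scale n (fun k => nums.count k) (z+1) ks hpos]
  set lB := ks.foldl (fun prev k => pvRowB prev k ((nums.count k : Nat) : Int) n)
      ((1:Int) :: List.replicate r.toNat 0) with hlB
  have hlen : lB.length = n := pvFold_length n _ ks _ (by simp [hn])
  have hsum : ∀ t : List Int, ((t.map (fun x => (z+1) * x)).sum) = (z+1) * t.sum := by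
    intro t
    simpa using List.sum_map_mul_left t (fun x => x) (z+1)
  -- final step: both slices start at the same clamped index and reach the row's end
  have hlen' : lB.length = r.toNat + 1 := by rw [hlen, hn]
  have hBslice : PySem.List.slice lB (some l) (some (r+1))
      = List.drop (PySem.List.clampIdx lB.length l) lB := by
    have hcl : PySem.List.clampIdx lB.length (r+1) = lB.length := by
      simp only [PySem.List.clampIdx]
      rw [if_neg (by omega)]
      omega
    simp only [PySem.List.slice]
    rw [hcl]
    exact List.take_of_length_le (by simp)
  rw [hBslice, PySem.List.slice_some_none, List.length_map, ← List.map_drop, hsum]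
  ring_nf

-- ===== VERDICT (by name: the statement is the Claim_ definition above) =====
theorem countSubMultisets2_spec : Claim_equal_countSubMultisets2 := by
  intro nums l r _ hpre
  obtain ⟨hr, hnn⟩ := hpre
  exact pv_main nums l r hr hnn
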